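-- pv_equiv track=rewrite | github.com/bertrand-faure/popcorn | popcorn/stitching.py | rearrange_folders_list
-- ===== SOURCE A (Python) =====
-- def rearrange_folders_list(starting_position, number_of_lines, number_of_columns):
--     """Sorts indices of multiple-tiles image based on starting position and size of the grid
--
--     Args:
--         starting_position (str): Position of first tile (either top-left, top-right, bottom-left or bottom-right)
--         number_of_lines (int):   Number of lines in the final grid
--         number_of_columns (int): Number of columns in the final grid
--
--     Returns (list[int]): list of sorted indices
--
--     """
--     list_of_folders = list(range(number_of_lines * number_of_columns))
--     for nb_line in range(number_of_lines):
--         if (nb_line + ("left" in starting_position) * 1) % 2 == 0: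
--             list_of_folders[nb_line * number_of_columns: nb_line * number_of_columns + number_of_columns] = \
--                 list(reversed(
--                     list_of_folders[nb_line * number_of_columns: nb_line * number_of_columns + number_of_columns]))
--
--     if "bottom" in starting_position:
--         new_list_of_folders = list(range(1, number_of_lines * number_of_columns + 1))
--         for nb_line in range(number_of_lines):
--             if nb_line * number_of_columns > 0:
--                 new_list_of_folders[nb_line * number_of_columns:
--                                     nb_line * number_of_columns + number_of_columns] = \
--                     list_of_folders[-(nb_line * number_of_columns + number_of_columns):
--                                     -(nb_line * number_of_columns)]
--             else:
--                 new_list_of_folders[nb_line * number_of_columns: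
--                                     nb_line * number_of_columns + number_of_columns] = \
--                     list_of_folders[-(nb_line * number_of_columns + number_of_columns):]
--     else:
--         new_list_of_folders = list_of_folders
--     return new_list_of_folders
-- ===== SOURCE B (Python) =====
-- def rearrange_folders_list(starting_position, number_of_lines, number_of_columns):
--     if number_of_lines <= 0 or number_of_columns <= 0:
--         return []
--     left = "left" in starting_position
--     bottom = "bottom" in starting_position
--     out = []
--     for p in range(number_of_lines * number_of_columns):
--         r, c = divmod(p, number_of_columns)
--         sr = number_of_lines - 1 - r if bottom else r
--         sc = number_of_columns - 1 - c if (sr + left) % 2 == 0 else c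
--         out.append(sr * number_of_columns + sc)
--     return out
-- ===== Notes on version B (the rewrite author's own statement) =====
-- stated objective: alternative
-- what changed: B never builds, reverses or slices any intermediate list: it computes each output element directly by index arithmetic (for flat position p, divmod gives the grid cell, a sign-adjusted row/column formula gives the source tile index), a single arithmetic pass instead of A's slice-reversal pass plus negative-index copying pass.
-- intended difference: When both number_of_lines and number_of_columns are negative their product is positive, so A returns list(range(lines*columns)) although the grid has no rows; B returns [], the intended empty result for non-positive dimensions. — e.g. on rearrange_folders_list("top-left", -1, -1): A returns [0], B returns []
import Mathlib
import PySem

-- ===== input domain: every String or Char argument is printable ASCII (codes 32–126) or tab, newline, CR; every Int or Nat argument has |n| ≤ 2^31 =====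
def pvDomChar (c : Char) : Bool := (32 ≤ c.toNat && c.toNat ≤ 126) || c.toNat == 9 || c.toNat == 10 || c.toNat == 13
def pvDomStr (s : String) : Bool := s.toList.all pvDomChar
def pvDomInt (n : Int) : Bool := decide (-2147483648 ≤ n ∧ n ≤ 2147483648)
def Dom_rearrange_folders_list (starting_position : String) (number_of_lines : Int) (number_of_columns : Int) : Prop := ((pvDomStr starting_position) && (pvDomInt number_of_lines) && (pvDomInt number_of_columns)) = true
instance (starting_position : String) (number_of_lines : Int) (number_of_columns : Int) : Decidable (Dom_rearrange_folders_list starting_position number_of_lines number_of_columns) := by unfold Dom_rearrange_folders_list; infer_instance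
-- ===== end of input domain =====

-- B computes each output element directly by index arithmetic (divmod of the flat position,
-- then a sign-adjusted row/column formula), with no intermediate lists, slices or reversals
-- (objective: alternative).

-- ===== PORT A =====
-- Python slice assignment xs[a:b] = repl (int bounds, no step): exact — Python clamps both
-- bounds to [0, len] (negative bounds counted from the end, via PySem.List.clampIdx) and, if
-- the stop resolves before the start, inserts at the start position (hence the 'max').
def pySetSlice (xs : List Int) (a b : Int) (repl : List Int) : List Int :=
  let i := PySem.List.clampIdx xs.length a
  let j := max i (PySem.List.clampIdx xs.length b)
  xs.take i ++ repl ++ xs.drop j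

def rearrange_folders_list (starting_position : String) (number_of_lines : Int) (number_of_columns : Int) : List Int :=
  let list_of_folders := PySem.List.pyRange 0 (number_of_lines * number_of_columns) 1
  let list_of_folders := (PySem.List.pyRange 0 number_of_lines 1).foldl (fun lst nb_line =>
    if PySem.Int.mod (nb_line + (if PySem.Str.isIn "left" starting_position then 1 else 0) * 1) 2 == 0 then
      pySetSlice lst (nb_line * number_of_columns) (nb_line * number_of_columns + number_of_columns)
        ((PySem.List.slice lst (some (nb_line * number_of_columns)) (some (nb_line * number_of_columns + number_of_columns))).reverse)
    else lst) list_of_folders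
  if PySem.Str.isIn "bottom" starting_position then
    (PySem.List.pyRange 0 number_of_lines 1).foldl (fun new_lst nb_line =>
      if nb_line * number_of_columns > 0 then
        pySetSlice new_lst (nb_line * number_of_columns) (nb_line * number_of_columns + number_of_columns)
          (PySem.List.slice list_of_folders (some (-(nb_line * number_of_columns + number_of_columns))) (some (-(nb_line * number_of_columns))))
      else
        pySetSlice new_lst (nb_line * number_of_columns) (nb_line * number_of_columns + number_of_columns)
          (PySem.List.slice list_of_folders (some (-(nb_line * number_of_columns + number_of_columns))) none))
      (PySem.List.pyRange 1 (number_of_lines * number_of_columns + 1) 1)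
  else list_of_folders

-- ===== PORT B =====
-- B's loop body: the source tile index for flat output position p.
def snakeIndex (bottom : Bool) (left : Int) (number_of_lines : Int) (number_of_columns : Int) (p : Int) : Int :=
  let r := PySem.Int.floordiv p number_of_columns
  let c := PySem.Int.mod p number_of_columns
  let sr := if bottom then number_of_lines - 1 - r else r
  let sc := if PySem.Int.mod (sr + left) 2 == 0 then number_of_columns - 1 - c else c
  sr * number_of_columns + sc

def rearrange_folders_list_alt (starting_position : String) (number_of_lines : Int) (number_of_columns : Int) : List Int :=
  if number_of_lines ≤ 0 ∨ number_of_columns ≤ 0 then []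
  else
    let left : Int := if PySem.Str.isIn "left" starting_position then 1 else 0
    let bottom := PySem.Str.isIn "bottom" starting_position
    (PySem.List.pyRange 0 (number_of_lines * number_of_columns) 1).foldl
      (fun out p => out ++ [snakeIndex bottom left number_of_lines number_of_columns p]) []

-- ===== PRECONDITION & SPEC =====
-- When both number_of_lines and number_of_columns are negative their product is positive, so A
-- returns list(range(lines*columns)) although the grid has no rows; B returns [], the intended
-- empty result for non-positive dimensions.
def D_rearrange_folders_list (starting_position : String) (number_of_lines : Int) (number_of_columns : Int) : Prop :=
  number_of_lines < 0 ∧ number_of_columns < 0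
instance (starting_position : String) (number_of_lines : Int) (number_of_columns : Int) : Decidable (D_rearrange_folders_list starting_position number_of_lines number_of_columns) := by unfold D_rearrange_folders_list; infer_instance

def Spec_rearrange_folders_list (starting_position : String) (number_of_lines : Int) (number_of_columns : Int) (out : List Int) : Prop := ¬ D_rearrange_folders_list starting_position number_of_lines number_of_columns → out = rearrange_folders_list_alt starting_position number_of_lines number_of_columns
instance (starting_position : String) (number_of_lines : Int) (number_of_columns : Int) (out : List Int) : Decidable (Spec_rearrange_folders_list starting_position number_of_lines number_of_columns out) := by unfold Spec_rearrange_folders_list; infer_instance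

def pvDiffWitness_rearrange_folders_list : String × Int × Int := ("top-left", -1, -1)
def pvDiffWitnessOut_rearrange_folders_list : (List Int) × (List Int) := ([0], [])

-- ===== CLAIM (what is proved, stated in full; the proofs are below) =====
def Claim_unchanged_rearrange_folders_list : Prop := ∀ (starting_position : String) (number_of_lines : Int) (number_of_columns : Int), Dom_rearrange_folders_list starting_position number_of_lines number_of_columns → Spec_rearrange_folders_list starting_position number_of_lines number_of_columns (rearrange_folders_list starting_position number_of_lines number_of_columns)
def Claim_changed_rearrange_folders_list : Prop := Dom_rearrange_folders_list (pvDiffWitness_rearrange_folders_list.1) (pvDiffWitness_rearrange_folders_list.2.1) (pvDiffWitness_rearrange_folders_list.2.2) ∧ D_rearrange_folders_list (pvDiffWitness_rearrange_folders_list.1) (pvDiffWitness_rearrange_folders_list.2.1) (pvDiffWitness_rearrange_folders_list.2.2) ∧ rearrange_folders_list (pvDiffWitness_rearrange_folders_list.1) (pvDiffWitness_rearrange_folders_list.2.1) (pvDiffWitness_rearrange_folders_list.2.2) = pvDiffWitnessOut_rearrange_folders_list.1 ∧ rearrange_folders_list_alt (pvDiffWitness_rearrange_folders_list.1) (pvDiffWitness_rearrange_folders_list.2.1)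 (pvDiffWitness_rearrange_folders_list.2.2) = pvDiffWitnessOut_rearrange_folders_list.2 ∧ pvDiffWitnessOut_rearrange_folders_list.1 ≠ pvDiffWitnessOut_rearrange_folders_list.2
def Claim_exact_rearrange_folders_list : Prop := ∀ (starting_position : String) (number_of_lines : Int) (number_of_columns : Int), Dom_rearrange_folders_list starting_position number_of_lines number_of_columns → D_rearrange_folders_list starting_position number_of_lines number_of_columns → rearrange_folders_list starting_position number_of_lines number_of_columns ≠ rearrange_folders_list_alt starting_position number_of_lines number_of_columns

-- ===== LEMMAS AND PROOFS =====
-- row r of the snake grid (cond says whether row r is reversed)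
def rowG (cond : Int → Bool) (c : Nat) (r : Int) : List Int :=
  if cond r then (PySem.List.pyRange (r*(c:Int)) (r*(c:Int)+(c:Int)) 1).reverse
  else PySem.List.pyRange (r*(c:Int)) (r*(c:Int)+(c:Int)) 1

theorem rowG_len (cond : Int → Bool) (c : Nat) (r : Int) : (rowG cond c r).length = c := by
  unfold rowG; split <;> simp [PySem.List.length_pyRange_one, add_sub_cancel_left]

theorem flat_len (rs : List (List Int)) (c : Nat) (h : ∀ r ∈ rs, r.length = c) :
    rs.flatten.length = rs.length * c := by
  induction rs with
  | nil => simp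
  | cons r t ih =>
    simp only [List.flatten_cons, List.length_append, List.length_cons]
    rw [h r (by simp), ih (fun x hx => h x (by simp [hx]))]; ring

theorem take_mid (P T : List Int) (n : Nat) (hP : P.length = n) : (P ++ T).take n = P := by
  subst hP; exact List.take_left ..

theorem drop_mid (P T : List Int) (n : Nat) (hP : P.length = n) : (P ++ T).drop n = T := by
  subst hP; exact List.drop_left ..

theorem slice_mid (P T : List Int) (c k : Nat) (hP : P.length = k*c) :
    PySem.List.slice (P ++ T) (some ((k*c : Nat) : Int)) (some (((k*c : Nat) : Int) + (c : Int))) = T.take c := by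
  rw [show (((k*c : Nat) : Int) + (c : Int)) = ((k*c + c : Nat) : Int) by push_cast; ring]
  rw [PySem.List.slice_natCast, drop_mid P T _ hP]
  congr 1; omega

theorem setSlice_mid (P T : List Int) (c k : Nat) (hc : 0 < c) (hP : P.length = k*c) (hT : c ≤ T.length)
    (repl : List Int) :
    pySetSlice (P ++ T) ((k*c : Nat) : Int) (((k*c : Nat) : Int) + (c : Int)) repl = P ++ repl ++ T.drop c := by
  unfold pySetSlice
  dsimp only
  rw [show (((k*c : Nat) : Int) + (c : Int)) = ((k*c + c : Nat) : Int) by push_cast; ring]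
  rw [PySem.List.clampIdx_natCast, PySem.List.clampIdx_natCast]
  have hlen : (P ++ T).length = k*c + T.length := by simp [hP]
  have h1 : min (k*c) (P ++ T).length = k*c := by omega
  have h2 : max (k*c) (min (k*c+c) (P ++ T).length) = k*c + c := by omega
  rw [h1, h2, take_mid P T _ hP, show k*c+c = P.length + c by omega, List.drop_length_add_append]

-- xs[-(k2):-(k1)] for 0 < k1 ≤ k2 ≤ len
theorem slice_neg_neg (xs : List Int) (k1 k2 : Nat) (h1 : 0 < k1) (h2 : k1 ≤ k2) (h3 : k2 ≤ xs.length) :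
    PySem.List.slice xs (some (-(k2 : Int))) (some (-(k1 : Int))) = (xs.drop (xs.length - k2)).take (k2 - k1) := by
  unfold PySem.List.slice
  dsimp only
  rw [PySem.List.clampIdx_neg_natCast _ _ (by omega : 0 < k2), PySem.List.clampIdx_neg_natCast _ _ h1]
  congr 1; omega

-- invariant of A's first loop: after k lines, the prefix carries the snake rows, the tail is untouched
theorem loop1 (cond : Int → Bool) (l c : Nat) (hc : 0 < c) :
    ∀ k : Nat, k ≤ l →
    (PySem.List.pyRange 0 (k:Int) 1).foldl
      (fun lst nb => if cond nb then
          pySetSlice lst (nb*(c:Int)) (nb*(c:Int)+(c:Int))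
            ((PySem.List.slice lst (some (nb*(c:Int))) (some (nb*(c:Int)+(c:Int)))).reverse)
        else lst)
      (PySem.List.pyRange 0 ((l:Int)*(c:Int)) 1)
    = ((PySem.List.pyRange 0 (k:Int) 1).map (rowG cond c)).flatten
        ++ PySem.List.pyRange ((k:Int)*(c:Int)) ((l:Int)*(c:Int)) 1 := by
  intro k
  induction k with
  | zero => simp [PySem.List.pyRange_one_eq_nil (by omega : (0:Int) ≤ 0)]
  | succ k ih =>
    intro hk
    have hkk : ((k+1:Nat):Int) = (k:Int)+1 := by push_cast; ring
    rw [hkk, PySem.List.pyRange_one_succ_right (by positivity : (0:Int) ≤ (k:Int)),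
        List.foldl_append, List.foldl_cons, List.foldl_nil, ih (by omega),
        List.map_append, List.flatten_append]
    have hkc : (k:Int)*(c:Int) = ((k*c : Nat) : Int) := by push_cast; ring
    rw [show ((k:Int)+1)*(c:Int) = ((k*c : Nat) : Int) + (c:Int) by push_cast; ring]
    simp only [hkc]
    set P := ((PySem.List.pyRange 0 (k:Int) 1).map (rowG cond c)).flatten with hPdef
    have hP : P.length = k * c := by
      rw [hPdef, flat_len _ c (by
        intro r hr
        obtain ⟨x, _, rfl⟩ := List.mem_map.mp hr
        exact rowG_len ..)]
      simp [PySem.List.length_pyRange_one]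
    have hsplit : PySem.List.pyRange ((k*c : Nat) : Int) ((l:Int)*(c:Int)) 1
        = PySem.List.pyRange ((k*c : Nat) : Int) (((k*c : Nat) : Int)+(c:Int)) 1
          ++ PySem.List.pyRange (((k*c : Nat) : Int)+(c:Int)) ((l:Int)*(c:Int)) 1 :=
      PySem.List.pyRange_one_append _ _ _ (by push_cast; nlinarith)
        (by push_cast; nlinarith [hk, hc])
    have hTlen : c ≤ (PySem.List.pyRange ((k*c : Nat) : Int) ((l:Int)*(c:Int)) 1).length := by
      rw [PySem.List.length_pyRange_one]
      have : (c:Int) ≤ (l:Int)*(c:Int) - ((k*c : Nat) : Int) := by push_cast; nlinarith [hk, hc]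
      omega
    have hslice : PySem.List.slice (P ++ PySem.List.pyRange ((k*c : Nat) : Int) ((l:Int)*(c:Int)) 1)
        (some ((k*c : Nat) : Int)) (some (((k*c : Nat) : Int)+(c:Int)))
        = PySem.List.pyRange ((k*c : Nat) : Int) (((k*c : Nat) : Int)+(c:Int)) 1 := by
      rw [slice_mid P _ c k hP, hsplit]
      exact List.take_left' (by simp [PySem.List.length_pyRange_one])
    have hset : ∀ repl : List Int,
        pySetSlice (P ++ PySem.List.pyRange ((k*c : Nat) : Int) ((l:Int)*(c:Int)) 1)
          ((k*c : Nat) : Int) (((k*c : Nat) : Int)+(c:Int)) repl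
        = P ++ repl ++ PySem.List.pyRange (((k*c : Nat) : Int)+(c:Int)) ((l:Int)*(c:Int)) 1 := by
      intro repl
      rw [setSlice_mid P _ c k hc hP hTlen repl, hsplit,
          List.drop_left' (by simp [PySem.List.length_pyRange_one])]
    by_cases hcnd : cond (k:Int)
    · rw [if_pos hcnd, hslice, hset]
      simp only [List.map_cons, List.map_nil, List.flatten_cons, List.flatten_nil,
        rowG, if_pos hcnd, hkc, List.append_nil, List.append_assoc]
    · rw [if_neg hcnd]
      simp only [List.map_cons, List.map_nil, List.flatten_cons, List.flatten_nil,
        rowG, if_neg hcnd, hkc, List.append_nil, List.append_assoc]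
      rw [hsplit]

def snakeRows (cond : Int → Bool) (l c : Nat) : List Int :=
  ((PySem.List.pyRange 0 (l:Int) 1).map (rowG cond c)).flatten

theorem snakeRows_len (cond : Int → Bool) (l c : Nat) : (snakeRows cond l c).length = l * c := by
  unfold snakeRows
  rw [flat_len _ c (by
    intro r hr
    obtain ⟨x, _, rfl⟩ := List.mem_map.mp hr
    exact rowG_len ..)]
  simp [PySem.List.length_pyRange_one]

theorem loop1_final (cond : Int → Bool) (l c : Nat) (hc : 0 < c) :
    (PySem.List.pyRange 0 (l:Int) 1).foldl
      (fun lst nb => if cond nb then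
          pySetSlice lst (nb*(c:Int)) (nb*(c:Int)+(c:Int))
            ((PySem.List.slice lst (some (nb*(c:Int))) (some (nb*(c:Int)+(c:Int)))).reverse)
        else lst)
      (PySem.List.pyRange 0 ((l:Int)*(c:Int)) 1)
    = snakeRows cond l c := by
  rw [loop1 cond l c hc l (le_refl l), PySem.List.pyRange_one_eq_nil (le_refl _), List.append_nil]
  rfl

theorem snake_drop (cond : Int → Bool) (l c : Nat) (j : Nat) (hj : j ≤ l) :
    (snakeRows cond l c).drop (j*c)
      = ((PySem.List.pyRange (j:Int) (l:Int) 1).map (rowG cond c)).flatten := by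
  unfold snakeRows
  rw [PySem.List.pyRange_one_append 0 (j:Int) (l:Int) (by positivity) (by exact_mod_cast hj),
      List.map_append, List.flatten_append]
  refine List.drop_left' ?_
  rw [flat_len _ c (by
    intro r hr
    obtain ⟨x, _, rfl⟩ := List.mem_map.mp hr
    exact rowG_len ..)]
  simp [PySem.List.length_pyRange_one]

-- row j of the snake grid, read off the flattened list
theorem snake_row (cond : Int → Bool) (l c : Nat) (j : Nat) (hj : j < l) :
    ((snakeRows cond l c).drop (j*c)).take c = rowG cond c (j:Int) := by
  rw [snake_drop cond l c j hj.le,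
      PySem.List.pyRange_one_cons (by exact_mod_cast hj), List.map_cons, List.flatten_cons]
  exact List.take_left' (rowG_len ..)

theorem loop2 (cond : Int → Bool) (l c : Nat) (hc : 0 < c) (hl : 0 < l) :
    ∀ k : Nat, k ≤ l →
    (PySem.List.pyRange 0 (k:Int) 1).foldl
      (fun new_lst nb => if nb * (c:Int) > 0 then
          pySetSlice new_lst (nb*(c:Int)) (nb*(c:Int)+(c:Int))
            (PySem.List.slice (snakeRows cond l c) (some (-(nb*(c:Int)+(c:Int)))) (some (-(nb*(c:Int)))))
        else
          pySetSlice new_lst (nb*(c:Int)) (nb*(c:Int)+(c:Int))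
            (PySem.List.slice (snakeRows cond l c) (some (-(nb*(c:Int)+(c:Int)))) none))
      (PySem.List.pyRange 1 ((l:Int)*(c:Int)+1) 1)
    = ((PySem.List.pyRange 0 (k:Int) 1).map (fun r => rowG cond c ((l:Int)-1-r))).flatten
        ++ PySem.List.pyRange ((k:Int)*(c:Int)+1) ((l:Int)*(c:Int)+1) 1 := by
  intro k
  induction k with
  | zero => simp [PySem.List.pyRange_one_eq_nil (by omega : (0:Int) ≤ 0)]
  | succ k ih =>
    intro hk
    have hkk : ((k+1:Nat):Int) = (k:Int)+1 := by push_cast; ring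
    rw [hkk, PySem.List.pyRange_one_succ_right (by positivity : (0:Int) ≤ (k:Int)),
        List.foldl_append, List.foldl_cons, List.foldl_nil, ih (by omega),
        List.map_append, List.flatten_append]
    have hkc : (k:Int)*(c:Int) = ((k*c : Nat) : Int) := by push_cast; ring
    rw [show ((k:Int)+1)*(c:Int)+1 = ((k*c : Nat) : Int) + (c:Int) + 1 by push_cast; ring]
    simp only [hkc]
    set P := ((PySem.List.pyRange 0 (k:Int) 1).map (fun r => rowG cond c ((l:Int)-1-r))).flatten with hPdef
    have hP : P.length = k * c := by
      rw [hPdef, flat_len _ c (by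
        intro r hr
        obtain ⟨x, _, rfl⟩ := List.mem_map.mp hr
        exact rowG_len ..)]
      simp [PySem.List.length_pyRange_one]
    -- the initial list is P ++ untouched tail; split the tail at the next row boundary (all shifted by 1)
    have hsplit : PySem.List.pyRange (((k*c : Nat) : Int)+1) ((l:Int)*(c:Int)+1) 1
        = PySem.List.pyRange (((k*c : Nat) : Int)+1) (((k*c : Nat) : Int)+(c:Int)+1) 1
          ++ PySem.List.pyRange (((k*c : Nat) : Int)+(c:Int)+1) ((l:Int)*(c:Int)+1) 1 :=
      PySem.List.pyRange_one_append _ _ _ (by push_cast; nlinarith)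
        (by push_cast; nlinarith [hk, hc])
    have hTlen : c ≤ (PySem.List.pyRange (((k*c : Nat) : Int)+1) ((l:Int)*(c:Int)+1) 1).length := by
      rw [PySem.List.length_pyRange_one]
      have : (c:Int) ≤ ((l:Int)*(c:Int)+1) - (((k*c : Nat) : Int)+1) := by push_cast; nlinarith [hk, hc]
      omega
    have hset : ∀ repl : List Int,
        pySetSlice (P ++ PySem.List.pyRange (((k*c : Nat) : Int)+1) ((l:Int)*(c:Int)+1) 1)
          ((k*c : Nat) : Int) (((k*c : Nat) : Int)+(c:Int)) repl
        = P ++ repl ++ PySem.List.pyRange (((k*c : Nat) : Int)+(c:Int)+1) ((l:Int)*(c:Int)+1) 1 := by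
      intro repl
      rw [setSlice_mid P _ c k hc hP hTlen repl, hsplit,
          List.drop_left' (by simp [PySem.List.length_pyRange_one])]
    -- the row copied from the bottom of the snake list
    have hrow : ((snakeRows cond l c).drop ((l-1-k)*c)).take c = rowG cond c ((l:Int)-1-(k:Int)) := by
      rw [snake_row cond l c (l-1-k) (by omega)]
      congr 1
      omega
    by_cases hk0 : k = 0
    · subst hk0
      rw [if_neg (by simp)]
      have h0 : ((0*c : Nat) : Int) = 0 := by simp
      rw [show (-(((0*c : Nat) : Int)+(c:Int))) = -((c : Nat) : Int) by rw [h0]; ring,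
          PySem.List.slice_from_neg_natCast _ c hc, snakeRows_len,
          show l*c - c = (l-1-0)*c by rw [Nat.sub_zero, Nat.sub_mul, one_mul],
          snake_drop cond l c (l-1-0) (by omega),
          show ((l-1-0 : Nat) : Int) = (l:Int)-1 by omega]
      have hsingle : PySem.List.pyRange ((l:Int)-1) (l:Int) 1 = [(l:Int)-1] := by
        have h := PySem.List.pyRange_one_singleton ((l:Int)-1)
        rw [show ((l:Int)-1)+1 = (l:Int) by ring] at h
        exact h
      rw [hsingle, List.map_cons, List.map_nil, List.flatten_cons, List.flatten_nil,
          List.append_nil, hset (rowG cond c ((l:Int)-1))]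
      simp only [List.map_cons, List.map_nil, List.flatten_cons, List.flatten_nil,
        List.append_nil, List.append_assoc, Nat.cast_zero, sub_zero]
    · rw [if_pos (by exact_mod_cast Nat.mul_pos (by omega : 0 < k) hc)]
      rw [show (-(((k*c : Nat) : Int)+(c:Int))) = -(((k*c+c : Nat) : Int)) by push_cast; ring,
          slice_neg_neg (snakeRows cond l c) (k*c) (k*c+c) (Nat.mul_pos (by omega) hc) (by omega)
            (by rw [snakeRows_len]; nlinarith [hk, hc]),
          snakeRows_len,
          show l*c - (k*c+c) = (l-1-k)*c by
            rw [Nat.sub_mul, Nat.sub_mul, one_mul]; omega,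
          show k*c+c-k*c = c by omega,
          hrow, hset (rowG cond c ((l:Int)-1-(k:Int)))]
      simp only [List.map_cons, List.map_nil, List.flatten_cons, List.flatten_nil,
        List.append_nil, List.append_assoc]

-- the flat range splits into per-row ranges
theorem range_flat (l c : Nat) :
    PySem.List.pyRange 0 ((l:Int)*(c:Int)) 1
      = ((PySem.List.pyRange 0 (l:Int) 1).map
          (fun r => PySem.List.pyRange (r*(c:Int)) (r*(c:Int)+(c:Int)) 1)).flatten := by
  induction l with
  | zero => simp [PySem.List.pyRange_one_eq_nil (by omega : (0:Int) ≤ 0)]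
  | succ k ih =>
    have hkk : ((k+1:Nat):Int) = (k:Int)+1 := by push_cast; ring
    rw [hkk, PySem.List.pyRange_one_succ_right (by positivity : (0:Int) ≤ (k:Int)),
        List.map_append, List.flatten_append,
        PySem.List.pyRange_one_append 0 ((k:Int)*(c:Int)) (((k:Int)+1)*(c:Int))
          (by positivity) (by nlinarith [Nat.cast_nonneg (α := Int) c]),
        ih]
    simp only [List.map_cons, List.map_nil, List.flatten_cons, List.flatten_nil, List.append_nil]
    congr 1
    congr 1
    ring

-- helpers: a length-c Int segment (and its reverse) as a map over List.range
theorem map_pyRange_seg (a : Int) (c : Nat) (f : Int → Int) :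
    (PySem.List.pyRange a (a+(c:Int)) 1).map f = (List.range c).map (fun (k : Nat) => f (a + (k:Int))) := by
  rw [PySem.List.pyRange_one, List.map_map, show (a+(c:Int)-a) = (c:Int) by ring, Int.toNat_natCast]
  rfl

theorem pyRange_seg_reverse (a : Int) (c : Nat) :
    (PySem.List.pyRange a (a+(c:Int)) 1).reverse = (List.range c).map (fun (k : Nat) => a + (c:Int) - 1 - (k:Int)) := by
  have h := PySem.List.pyRange_neg_one_eq_reverse (a+(c:Int)-1) (a-1)
  rw [show a-1+1 = a by ring, show a+(c:Int)-1+1 = a+(c:Int) by ring] at h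
  rw [← h, PySem.List.pyRange_neg_one, show (a+(c:Int)-1-(a-1)) = (c:Int) by ring, Int.toNat_natCast]

-- B's per-position formula, mapped over one row's flat positions, is exactly that snake row
theorem snake_row_map (left L : Int) (bottom : Bool) (c : Nat) (hc : 0 < c) (r : Int) :
    (PySem.List.pyRange (r*(c:Int)) (r*(c:Int)+(c:Int)) 1).map (snakeIndex bottom left L (c:Int))
      = rowG (fun x => PySem.Int.mod (x + left) 2 == 0) c (if bottom then L - 1 - r else r) := by
  have hc' : (0:Int) < (c:Int) := by exact_mod_cast hc
  set s : Int := if bottom then L - 1 - r else r with hs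
  have hstep : ∀ p ∈ PySem.List.pyRange (r*(c:Int)) (r*(c:Int)+(c:Int)) 1,
      snakeIndex bottom left L (c:Int) p
        = if PySem.Int.mod (s + left) 2 == 0 then s*(c:Int) + ((c:Int) - 1 - (p - r*(c:Int)))
          else s*(c:Int) + (p - r*(c:Int)) := by
    intro p hp
    rw [PySem.List.mem_pyRange_one] at hp
    have hfd : PySem.Int.floordiv p (c:Int) = r :=
      (PySem.Int.floordiv_eq_iff_of_pos hc').mpr ⟨hp.1, by nlinarith [hp.2]⟩
    have hmod : PySem.Int.mod p (c:Int) = p - r*(c:Int) := by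
      have h := PySem.Int.floordiv_mul_add_mod p (c:Int)
      rw [hfd] at h
      linarith
    simp only [snakeIndex, hfd, hmod, ← hs]
    split <;> ring
  rw [List.map_congr_left hstep]
  unfold rowG
  by_cases hcond : (PySem.Int.mod (s + left) 2 == 0) = true
  · simp only [hcond, if_true]
    rw [map_pyRange_seg (r*(c:Int)) c, pyRange_seg_reverse (s*(c:Int)) c]
    refine List.map_congr_left ?_
    intro k _
    ring
  · rw [Bool.not_eq_true] at hcond
    simp only [hcond, Bool.false_eq_true, if_false]
    rw [map_pyRange_seg (r*(c:Int)) c, PySem.List.pyRange_one (s*(c:Int)),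
        show (s*(c:Int)+(c:Int)-s*(c:Int)) = (c:Int) by ring, Int.toNat_natCast]
    refine List.map_congr_left ?_
    intro k _
    ring

theorem foldl_nil_const {β : Type} (f : List Int → β → List Int) (h : ∀ x, f [] x = []) :
    ∀ ks : List β, ks.foldl f [] = []
  | [] => rfl
  | x :: t => by rw [List.foldl_cons, h x]; exact foldl_nil_const f h t

theorem main_eq (sp : String) (L C : Int) (hD : ¬ (L < 0 ∧ C < 0)) :
    rearrange_folders_list sp L C = rearrange_folders_list_alt sp L C := by
  by_cases hmain : 0 < L ∧ 0 < C
  · obtain ⟨hL, hC⟩ := hmain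
    unfold rearrange_folders_list rearrange_folders_list_alt
    rw [if_neg (show ¬ (L ≤ 0 ∨ C ≤ 0) by omega)]
    dsimp only
    rw [PySem.List.foldl_append_singleton_eq_map, List.nil_append]
    lift L to ℕ using hL.le with l
    lift C to ℕ using hC.le with c
    have hl : 0 < l := by exact_mod_cast hL
    have hc : 0 < c := by exact_mod_cast hC
    set left : Int := if PySem.Str.isIn "left" sp then 1 else 0 with hleft
    have hfun : (fun r => PySem.Int.mod (r + left * 1) 2 == 0)
        = (fun x => PySem.Int.mod (x + left) 2 == 0) := by
      funext x; rw [mul_one]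
    have hA := loop1_final (fun r => PySem.Int.mod (r + left * 1) 2 == 0) l c hc
    simp only [hA]
    rw [hfun]
    by_cases hbot : PySem.Str.isIn "bottom" sp = true
    · rw [if_pos hbot, hbot]
      have hA2 := loop2 (fun x => PySem.Int.mod (x + left) 2 == 0) l c hc hl l (le_refl l)
      rw [PySem.List.pyRange_one_eq_nil (le_refl ((l:Int)*(c:Int)+1)), List.append_nil] at hA2
      simp only [hA2]
      rw [range_flat l c, List.map_flatten, List.map_map]
      congr 1
      refine List.map_congr_left ?_
      intro r hr
      have h := snake_row_map left (l:Int) true c hc r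
      rw [if_pos rfl] at h
      simp only [Function.comp_apply]
      exact h.symm
    · rw [if_neg hbot]
      have hbt : PySem.Str.isIn "bottom" sp = false := by rwa [Bool.not_eq_true] at hbot
      rw [hbt]
      unfold snakeRows
      rw [range_flat l c, List.map_flatten, List.map_map]
      congr 1
      refine List.map_congr_left ?_
      intro r hr
      have h := snake_row_map left (l:Int) false c hc r
      simp only [Bool.false_eq_true, if_false] at h
      simp only [Function.comp_apply]
      exact h.symm
  · -- degenerate grid: A returns [] (all its ranges are empty or its loops touch nothing), B returns []
    have hLC : L * C ≤ 0 := by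
      rcases lt_trichotomy L 0 with h | h | h
      · have hCge : 0 ≤ C := by
          by_contra hcc
          exact hD ⟨h, by omega⟩
        nlinarith
      · simp [h]
      · have hC0 : C ≤ 0 := by
          by_contra hcc
          exact hmain ⟨h, by omega⟩
        nlinarith
    unfold rearrange_folders_list rearrange_folders_list_alt
    rw [if_pos (show (L ≤ 0 ∨ C ≤ 0) by omega)]
    dsimp only
    have h0 : PySem.List.pyRange 0 (L*C) 1 = [] := PySem.List.pyRange_one_eq_nil hLC
    have h1 : PySem.List.pyRange 1 (L*C+1) 1 = [] := PySem.List.pyRange_one_eq_nil (by omega)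
    have hA0 : List.foldl (fun lst nb_line =>
        if PySem.Int.mod (nb_line + (if PySem.Str.isIn "left" sp then 1 else 0) * 1) 2 == 0 then
          pySetSlice lst (nb_line * C) (nb_line * C + C)
            ((PySem.List.slice lst (some (nb_line * C)) (some (nb_line * C + C))).reverse)
        else lst) [] (PySem.List.pyRange 0 L 1) = [] := by
      refine foldl_nil_const _ (fun x => ?_) _
      dsimp only
      split <;> simp [pySetSlice, PySem.List.slice]
    simp only [h0, hA0, h1]
    have hA1 : List.foldl (fun new_lst nb_line =>
        if nb_line * C > 0 then
          pySetSlice new_lst (nb_line * C) (nb_line * C + C)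
            (PySem.List.slice ([] : List Int) (some (-(nb_line * C + C))) (some (-(nb_line * C))))
        else
          pySetSlice new_lst (nb_line * C) (nb_line * C + C)
            (PySem.List.slice ([] : List Int) (some (-(nb_line * C + C))) none)) [] (PySem.List.pyRange 0 L 1) = [] := by
      refine foldl_nil_const _ (fun x => ?_) _
      dsimp only
      split <;> simp [pySetSlice, PySem.List.slice]
    rw [hA1, ite_self]

theorem exact_ne (sp : String) (L C : Int) (hL : L < 0) (hC : C < 0) :
    rearrange_folders_list sp L C ≠ rearrange_folders_list_alt sp L C := by
  unfold rearrange_folders_list rearrange_folders_list_alt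
  rw [if_pos (show (L ≤ 0 ∨ C ≤ 0) by omega)]
  dsimp only
  have hrng : PySem.List.pyRange 0 L 1 = [] := PySem.List.pyRange_one_eq_nil hL.le
  have hpos : 0 < L * C := mul_pos_of_neg_of_neg hL hC
  simp only [hrng, List.foldl_nil]
  intro h
  by_cases hbot : PySem.Str.isIn "bottom" sp = true
  · rw [if_pos hbot] at h
    have h2 := congrArg List.length h
    rw [PySem.List.length_pyRange_one] at h2
    simp at h2
    omega
  · rw [if_neg hbot] at h
    have h2 := congrArg List.length h
    rw [PySem.List.length_pyRange_one] at h2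
    simp at h2
    omega

-- ===== VERDICT (by name: the statement is the Claim_ definition above) =====
theorem rearrange_folders_list_spec : Claim_unchanged_rearrange_folders_list := by
  intro starting_position number_of_lines number_of_columns _
  intro hD
  exact main_eq starting_position number_of_lines number_of_columns hD

theorem rearrange_folders_list_changed : Claim_changed_rearrange_folders_list := by
  unfold Claim_changed_rearrange_folders_list; decide

theorem rearrange_folders_list_tight : Claim_exact_rearrange_folders_list := by
  intro starting_position number_of_lines number_of_columns _ hD
  obtain ⟨h1, h2⟩ := hD
  exact exact_ne starting_position number_of_lines number_of_columns h1 h2
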